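-- pv_equiv track=rewrite | github.com/bitlogik/uniblow | cryptolib/rs1024.py | polymod_rs1024
-- ===== SOURCE A (Python) =====
-- GENERATOR = (
--     0xE0E040,
--     0x1C1C080,
--     0x3838100,
--     0x7070200,
--     0xE0E0009,
--     0x1C0C2412,
--     0x38086C24,
--     0x3090FC48,
--     0x21B1F890,
--     0x3F3F120,
-- )
--
-- def polymod_rs1024(values: list) -> int:
--     """Reed-Solomon code over GF(1024), for 10-bit blocks"""
--     if len(values) < 1:
--         raise ValueError("Must check values.")
--     chk = 1
--     for v in values:
--         b = chk >> 20
--         chk &= 0xFFFFF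
--         chk <<= 10
--         chk ^= v
--         for i in range(10):
--             if (b >> i) & 1:
--                 chk ^= GENERATOR[i]
--     return chk
-- ===== SOURCE B (Python) =====
-- GENERATOR = (
--     0xE0E040,
--     0x1C1C080,
--     0x3838100,
--     0x7070200,
--     0xE0E0009,
--     0x1C0C2412,
--     0x38086C24,
--     0x3090FC48,
--     0x21B1F890,
--     0x3F3F120,
-- )
--
--
-- def _build_table():
--     table = []
--     for x in range(1024):
--         t = 0
--         for i in range(10):
--             if (x >> i) & 1:
--                 t ^= GENERATOR[i]
--         table.append(t)
--     return table
--
--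
-- GEN_TABLE = _build_table()
--
--
-- def polymod_rs1024(values: list) -> int:
--     """Reed-Solomon code over GF(1024), for 10-bit blocks"""
--     if len(values) < 1:
--         raise ValueError("Must check values.")
--     chk = 1
--     for v in values:
--         b = chk >> 20
--         chk = (((chk & 0xFFFFF) << 10) ^ v) ^ GEN_TABLE[b % 1024]
--     return chk
-- ===== Notes on version B (the rewrite author's own statement) =====
-- stated objective: faster
-- what changed: Replaces the per-value inner 10-bit loop over GENERATOR with a one-time 1024-entry lookup table indexed by the low 10 bits of the shifted-out block (b % 1024), so each value costs one XOR and one table lookup.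
import Mathlib
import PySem

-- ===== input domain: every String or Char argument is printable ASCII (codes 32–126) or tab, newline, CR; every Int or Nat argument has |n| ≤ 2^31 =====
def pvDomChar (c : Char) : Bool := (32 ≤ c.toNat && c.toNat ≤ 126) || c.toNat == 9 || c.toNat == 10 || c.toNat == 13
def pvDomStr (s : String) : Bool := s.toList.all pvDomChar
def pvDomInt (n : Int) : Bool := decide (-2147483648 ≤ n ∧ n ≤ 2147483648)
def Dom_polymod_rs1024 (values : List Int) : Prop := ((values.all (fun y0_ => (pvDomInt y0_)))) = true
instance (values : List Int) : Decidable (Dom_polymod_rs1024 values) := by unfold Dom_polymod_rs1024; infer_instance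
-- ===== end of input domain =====

-- B precomputes a 1024-entry XOR table so the per-value inner 10-bit loop disappears (measured faster).

-- ===== PORT A =====
def GENERATOR : List Int :=
  [0xE0E040, 0x1C1C080, 0x3838100, 0x7070200, 0xE0E0009,
   0x1C0C2412, 0x38086C24, 0x3090FC48, 0x21B1F890, 0x3F3F120]

def polymod_rs1024 (values : List Int) : Int :=
  values.foldl (fun chk v =>
    let b := chk >>> 20
    let chk := PySem.Int.band chk 0xFFFFF
    let chk := chk <<< 10
    let chk := PySem.Int.bxor chk v
    (List.range 10).foldl (fun chk (i : Nat) =>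
      if PySem.Int.band (b >>> i) 1 = 1 then PySem.Int.bxor chk (GENERATOR.getD i 0) else chk) chk) 1

-- ===== PORT B =====
-- table[x] for x in range(1024); the Python index x is a nonnegative in-range int, so getD is exact
def GEN_TABLE : List Int :=
  (List.range 1024).map (fun (x : Nat) =>
    (List.range 10).foldl (fun t (i : Nat) =>
      if PySem.Int.band ((x : Int) >>> i) 1 = 1 then PySem.Int.bxor t (GENERATOR.getD i 0) else t) 0)

def polymod_rs1024_alt (values : List Int) : Int :=
  values.foldl (fun chk v =>
    let b := chk >>> 20
    PySem.Int.bxor (PySem.Int.bxor ((PySem.Int.band chk 0xFFFFF) <<< 10) v)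
      (GEN_TABLE.getD (PySem.Int.mod b 1024).toNat 0)) 1
      -- GEN_TABLE[b % 1024]: b % 1024 is a Python int in [0, 1024), so getD with toNat is exact

-- ===== PRECONDITION & SPEC =====
-- A raises ValueError on the empty list; Pre_ excludes exactly that input.
def Pre_polymod_rs1024 (values : List Int) : Prop := values ≠ []
instance (values : List Int) : Decidable (Pre_polymod_rs1024 values) := by unfold Pre_polymod_rs1024; infer_instance
def pvWitness_polymod_rs1024 : List Int := [1, 2, 3]

def Spec_polymod_rs1024 (values : List Int) (out : Int) : Prop := out = polymod_rs1024_alt values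
instance (values : List Int) (out : Int) : Decidable (Spec_polymod_rs1024 values out) := by unfold Spec_polymod_rs1024; infer_instance

-- ===== CLAIM (what is proved, stated in full; the proofs are below) =====
def Claim_equal_polymod_rs1024 : Prop := ∀ (values : List Int), Dom_polymod_rs1024 values → Pre_polymod_rs1024 values → Spec_polymod_rs1024 values (polymod_rs1024 values)

-- ===== LEMMAS AND PROOFS =====

theorem pv_bxor_eq_xor (a b : Int) : PySem.Int.bxor a b = a.xor b := by
  unfold PySem.Int.bxor Int.xor
  rcases a with a | a <;> rcases b with b | b <;> simp [Int.negSucc_eq] <;> split_ifs <;> omega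

theorem pv_xor_assoc (a b c : Int) : (a.xor b).xor c = a.xor (b.xor c) := by
  rcases a with a | a <;> rcases b with b | b <;> rcases c with c | c <;> simp [Int.xor, Nat.xor_assoc]

theorem pv_bxor_assoc (a b c : Int) :
    PySem.Int.bxor (PySem.Int.bxor a b) c = PySem.Int.bxor a (PySem.Int.bxor b c) := by
  simp only [pv_bxor_eq_xor, pv_xor_assoc]

theorem pv_bxor_zero_left (a : Int) : PySem.Int.bxor 0 a = a := by
  rw [PySem.Int.bxor_comm]; simp

-- only the low 10 bits of b are read, and they agree with those of b % 1024
theorem pv_bit_mod_eq (b : Int) (i : Nat) (h : i < 10) :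
    PySem.Int.band (b >>> i) 1 = PySem.Int.band ((PySem.Int.mod b 1024) >>> i) 1 := by
  rw [PySem.Int.band_one, PySem.Int.band_one]
  rw [Int.shiftRight_eq_div_pow, Int.shiftRight_eq_div_pow]
  show Int.fmod _ 2 = Int.fmod _ 2
  unfold PySem.Int.mod
  simp only [Int.fmod_eq_emod]
  norm_num
  interval_cases i <;> push_cast <;> omega

-- hoisting the accumulator out of the conditional-XOR fold
theorem pv_xor_fold_hoist (p : Nat → Prop) [DecidablePred p] (g : Nat → Int) :
    ∀ (l : List Nat) (base : Int),
      l.foldl (fun t (i : Nat) => if p i then PySem.Int.bxor t (g i) else t) base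
        = PySem.Int.bxor base (l.foldl (fun t (i : Nat) => if p i then PySem.Int.bxor t (g i) else t) 0) := by
  intro l
  induction l with
  | nil => intro base; simp [List.foldl]
  | cons i t ih =>
    intro base
    simp only [List.foldl]
    rw [ih, ih (if p i then PySem.Int.bxor 0 (g i) else 0)]
    by_cases hp : p i <;> simp [hp, pv_bxor_zero_left, pv_bxor_assoc]

theorem pv_table_getD (x : Nat) (hx : x < 1024) :
    GEN_TABLE.getD x 0
      = (List.range 10).foldl (fun t (i : Nat) =>
          if PySem.Int.band ((x : Int) >>> i) 1 = 1 then PySem.Int.bxor t (GENERATOR.getD i 0) else t) 0 := by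
  unfold GEN_TABLE
  rw [List.getD_eq_getElem?_getD, List.getElem?_map, List.getElem?_range hx]
  rfl

theorem pv_mod_1024_bounds (b : Int) : 0 ≤ PySem.Int.mod b 1024 ∧ PySem.Int.mod b 1024 < 1024 := by
  unfold PySem.Int.mod
  rw [Int.fmod_eq_emod]
  norm_num
  omega

theorem pv_mod_1024_toNat (b : Int) :
    ((PySem.Int.mod b 1024).toNat : Int) = PySem.Int.mod b 1024 := by
  have := pv_mod_1024_bounds b
  omega

theorem pv_mod_1024_lt (b : Int) : (PySem.Int.mod b 1024).toNat < 1024 := by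
  have := pv_mod_1024_bounds b
  omega

theorem pv_step_eq (chk v : Int) :
    (let b := chk >>> 20
     let chk := PySem.Int.band chk 0xFFFFF
     let chk := chk <<< 10
     let chk := PySem.Int.bxor chk v
     (List.range 10).foldl (fun chk (i : Nat) =>
       if PySem.Int.band (b >>> i) 1 = 1 then PySem.Int.bxor chk (GENERATOR.getD i 0) else chk) chk)
    = (let b := chk >>> 20
       PySem.Int.bxor (PySem.Int.bxor ((PySem.Int.band chk 0xFFFFF) <<< 10) v)
         (GEN_TABLE.getD (PySem.Int.mod b 1024).toNat 0)) := by
  simp only []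
  set b := chk >>> 20 with hb
  set base := PySem.Int.bxor ((PySem.Int.band chk 0xFFFFF) <<< 10) v with hbase
  have hcongr : (List.range 10).foldl (fun c (i : Nat) =>
        if PySem.Int.band (b >>> i) 1 = 1 then PySem.Int.bxor c (GENERATOR.getD i 0) else c) base
      = (List.range 10).foldl (fun c (i : Nat) =>
        if PySem.Int.band ((((PySem.Int.mod b 1024).toNat : Int)) >>> i) 1 = 1
        then PySem.Int.bxor c (GENERATOR.getD i 0) else c) base := by
    apply PySem.List.foldl_congr_mem
    intro c i hi
    rw [List.mem_range] at hi
    rw [pv_bit_mod_eq b i hi, pv_mod_1024_toNat]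
  rw [hcongr,
    pv_xor_fold_hoist (p := fun i => PySem.Int.band ((((PySem.Int.mod b 1024).toNat : Int)) >>> i) 1 = 1)
      (g := fun i => GENERATOR.getD i 0),
    pv_table_getD _ (pv_mod_1024_lt b)]

-- ===== VERDICT (by name: the statement is the Claim_ definition above) =====
theorem polymod_rs1024_spec : Claim_equal_polymod_rs1024 := by
  intro values _ _
  unfold Spec_polymod_rs1024 polymod_rs1024 polymod_rs1024_alt
  congr 1
  funext chk v
  exact pv_step_eq chk v
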